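-- pv_equiv track=rewrite | github.com/boufoiu/logical_function_silplifier | dockerized_backend/src/ModulesFinaux.py | our_to_user
-- ===== SOURCE A (Python) =====
-- def our_to_user(f):
--     f = f.split("+")
--     l = []
--     for m in f:
--         m = '.'.join(list(m))
--         liste_m = list(m)
--         for c in liste_m:
--             if c == c.upper() and c != ".":
--                 liste_m[liste_m.index(c)] = "!" + c
--         l.append("".join(liste_m))
--     return "+".join(l)
-- ===== SOURCE B (Python) =====
-- def our_to_user(f):
--     # Single left-to-right scan; no split/join of monomial lists, no list.index.
--     out = []
--     start = True
--     for c in f: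
--         if c == '+':
--             out.append('+')
--             start = True
--         else:
--             if not start:
--                 out.append('.')
--             if c == c.upper() and c != '.':
--                 out.append('!')
--             out.append(c)
--             start = False
--     return ''.join(out)
-- ===== Notes on version B (the rewrite author's own statement) =====
-- stated objective: simpler
-- what changed: B replaces A's split-on-'+' / per-monomial '.'-join / mutate-via-list.index pipeline by one left-to-right scan over the characters with a start-of-monomial flag, emitting separators and '!' prefixes on the fly.
import Mathlib
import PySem

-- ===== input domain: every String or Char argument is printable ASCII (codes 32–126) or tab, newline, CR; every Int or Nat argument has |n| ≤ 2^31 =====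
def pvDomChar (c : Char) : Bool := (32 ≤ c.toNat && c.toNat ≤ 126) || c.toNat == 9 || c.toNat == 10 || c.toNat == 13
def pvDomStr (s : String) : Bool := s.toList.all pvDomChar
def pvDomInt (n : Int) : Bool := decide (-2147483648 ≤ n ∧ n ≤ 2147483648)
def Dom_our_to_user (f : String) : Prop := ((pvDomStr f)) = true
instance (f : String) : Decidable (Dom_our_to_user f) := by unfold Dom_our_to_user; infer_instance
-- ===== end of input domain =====

-- B replaces A's split/join/index pipeline by a single left-to-right scan with a start-of-monomial flag (simpler).


-- ===== PORT A =====
-- per-monomial inner loop: 'for c in liste_m: if c == c.upper() and c != ".": liste_m[liste_m.index(c)] = "!" + c'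
-- Python iterates over the positions of the (length-preserving) mutated list, reading the current value each step;
-- liste_m.index(c) cannot fail (c is read from the list), so the unreachable `none` branch leaves the list unchanged.
def ourInnerLoop (xs : List (List Char)) : List (List Char) :=
  (List.range xs.length).foldl (fun ys i =>
    let c := ys.getD i ([] : List Char)
    if c = PySem.Chars.upper c ∧ c ≠ ['.'] then
      match PySem.List.index? ys c with
      | some j => ys.set j ('!' :: c)
      | none => ys
    else ys) xs

def our_to_user (f : String) : String :=
  let parts := PySem.Chars.splitOn f.toList ['+']
  let l := parts.foldl (fun l m =>
    let m2 := PySem.Chars.join ['.'] (m.map (fun c => [c]))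
    let liste := m2.map (fun c => [c])
    l ++ [PySem.Chars.join [] (ourInnerLoop liste)]) []
  String.ofList (PySem.Chars.join ['+'] l)

-- ===== PORT B =====
def our_to_user_alt (f : String) : String :=
  let st := f.toList.foldl (fun (st : List Char × Bool) c =>
    if c = '+' then (st.1 ++ ['+'], true)
    else (st.1 ++ (if st.2 then [] else ['.'])
               ++ (if PySem.Chars.upperChar c = c ∧ c ≠ '.' then ['!'] else [])
               ++ [c], false)) (([] : List Char), true)
  String.ofList st.1

-- ===== PRECONDITION & SPEC =====
def Spec_our_to_user (f : String) (out : String) : Prop := out = our_to_user_alt f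
instance (f : String) (out : String) : Decidable (Spec_our_to_user f out) := by unfold Spec_our_to_user; infer_instance

-- ===== CLAIM (what is proved, stated in full; the proofs are below) =====
def Claim_equal_our_to_user : Prop := ∀ (f : String), Dom_our_to_user f → Spec_our_to_user f (our_to_user f)

-- ===== LEMMAS AND PROOFS =====

-- All helper defs below are proof-only ghosts.

/-- one formatted character: '!'-prefix iff it is its own uppercase and not '.' -/
def pvG (c : Char) : List Char :=
  if PySem.Chars.upperChar c = c ∧ c ≠ '.' then ['!', c] else [c]

/-- formatted monomial -/
def pvFm : List Char → List Char
  | [] => []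
  | c :: p => pvG c ++ p.flatMap (fun d => '.' :: pvG d)

/-- simple structural split on '+': (first part, remaining parts) -/
def pvSplit : List Char → List Char × List (List Char)
  | [] => ([], [])
  | c :: cs =>
    let r := pvSplit cs
    if c = '+' then ([], r.1 :: r.2) else (c :: r.1, r.2)

/-- B's emission as a structural recursion -/
def pvRest : Bool → List Char → List Char
  | _, [] => []
  | st, c :: cs =>
    if c = '+' then '+' :: pvRest true cs
    else (if st then [] else ['.']) ++
         (if PySem.Chars.upperChar c = c ∧ c ≠ '.' then ['!'] else []) ++ [c] ++ pvRest false cs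

theorem pvIndex_pre {c : List Char} (pre : List (List Char)) (suf : List (List Char))
    (h : c ∉ pre) : PySem.List.index? (pre ++ c :: suf) c = some pre.length := by
  induction pre with
  | nil => simpa using PySem.List.index?_cons_self (xs := suf) (x := c)
  | cons x xs ih =>
    have hx : x ≠ c := fun hh => h (by simp [hh])
    have := PySem.List.index?_cons_of_ne (xs := xs ++ c :: suf) (v := c) hx
    simp only [List.cons_append, this, ih (fun hh => h (List.mem_cons_of_mem _ hh))]
    rfl

theorem pvInner_inv (d : List Char) :
    ∀ (i : Nat), i ≤ d.length →
    (List.range' i (d.length - i)).foldl (fun ys j =>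
      let c := ys.getD j ([] : List Char)
      if c = PySem.Chars.upper c ∧ c ≠ ['.'] then
        match PySem.List.index? ys c with
        | some k => ys.set k ('!' :: c)
        | none => ys
      else ys)
      ((d.take i).map pvG ++ (d.drop i).map (fun c => [c])) = d.map pvG := by
  intro i hi
  induction hn : d.length - i generalizing i with
  | zero =>
    have : i = d.length := by omega
    subst this
    simp
  | succ n ih =>
    have hlt : i < d.length := by omega
    have hdrop : d.drop i = d[i] :: d.drop (i + 1) := List.drop_eq_getElem_cons hlt
    rw [List.range'_succ, List.foldl_cons]
    have hpre_len : ((d.take i).map pvG).length = i := by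
      simp [List.length_take, Nat.min_eq_left (le_of_lt hlt)]
    set c := d[i] with hc
    have hget : (((d.take i).map pvG ++ ([c] : List Char) :: (d.drop (i+1)).map (fun c => [c])).getD i ([] : List Char))
        = [c] := by
      rw [List.getD_eq_getElem?_getD, List.getElem?_append_right (by omega)]
      have h0 : i - min i d.length = 0 := by omega
      simp [h0]
    have hcond : ([c] = PySem.Chars.upper [c] ∧ [c] ≠ ['.'])
        ↔ (PySem.Chars.upperChar c = c ∧ c ≠ '.') := by
      constructor
      · rintro ⟨h1, h2⟩
        refine ⟨?_, fun hh => h2 (by simp [hh])⟩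
        simpa [PySem.Chars.upper] using h1.symm
      · rintro ⟨h1, h2⟩
        exact ⟨by simp [PySem.Chars.upper, h1], by simp [h2]⟩
    by_cases hcnd : PySem.Chars.upperChar c = c ∧ c ≠ '.'
    · -- the character is replaced at its own index
      have hnotin : [c] ∉ (d.take i).map pvG := by
        intro hmem
        rcases List.mem_map.mp hmem with ⟨x, _, hx⟩
        by_cases hcx : PySem.Chars.upperChar x = x ∧ x ≠ '.'
        · simp [pvG, hcx] at hx
        · simp [pvG, hcx] at hx
          rcases hx with hx
          exact hcx (hx ▸ hcnd)
      have hidx : PySem.List.index?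
          ((d.take i).map pvG ++ ([c] : List Char) :: (d.drop (i+1)).map (fun c => [c])) [c]
          = some i := by
        have := pvIndex_pre ((d.take i).map pvG) ((d.drop (i+1)).map (fun c => [c])) hnotin
        rwa [hpre_len] at this
      have hset : (((d.take i).map pvG ++ ([c] : List Char) :: (d.drop (i+1)).map (fun c => [c])).set
            i ('!' :: [c]))
          = (d.take (i+1)).map pvG ++ (d.drop (i+1)).map (fun c => [c]) := by
        rw [List.set_append_right _ _ (by omega), hpre_len]
        simp only [Nat.sub_self, List.set_cons_zero]
        rw [List.take_add_one, List.getElem?_eq_getElem hlt]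
        simp [← hc, pvG, hcnd]
      rw [hdrop]
      simp only [List.map_cons]
      rw [show (((d.take i).map pvG ++ ([c] : List Char) :: (d.drop (i+1)).map fun c => [c]).getD i ([] : List Char)) = [c] from hget]
      rw [if_pos (hcond.mpr hcnd)]
      rw [hidx]
      simp only [hset]
      have := ih (i + 1) (by omega) (by omega)
      simpa using this
    · -- unchanged; reassociate the untouched element into the mapped prefix
      rw [hdrop]
      simp only [List.map_cons]
      rw [show (((d.take i).map pvG ++ ([c] : List Char) :: (d.drop (i+1)).map fun c => [c]).getD i ([] : List Char)) = [c] from hget]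
      rw [if_neg (fun hh => hcnd (hcond.mp hh))]
      have hassoc : (d.take i).map pvG ++ ([c] : List Char) :: (d.drop (i+1)).map (fun c => [c])
          = (d.take (i+1)).map pvG ++ (d.drop (i+1)).map (fun c => [c]) := by
        rw [List.take_add_one, List.getElem?_eq_getElem hlt]
        simp [← hc, pvG, hcnd]
      rw [hassoc]
      have := ih (i + 1) (by omega) (by omega)
      simpa using this

theorem pvInnerLoop_eq (d : List Char) :
    ourInnerLoop (d.map (fun c => [c])) = d.map pvG := by
  have := pvInner_inv d 0 (Nat.zero_le _)
  simpa [ourInnerLoop, List.range_eq_range'] using this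

/-- '.'-joined singleton pieces, flattened through pvG, give the formatted monomial -/
theorem pvJoinNil (l : List (List Char)) : PySem.Chars.join [] l = l.flatten := by
  induction l with
  | nil => rfl
  | cons x xs ih =>
    cases xs with
    | nil => simp [PySem.Chars.join, List.intercalate]
    | cons y ys =>
      rw [PySem.Chars.join_cons_cons]
      simp [ih]

theorem pvDotted (p : List Char) :
    (PySem.Chars.join ['.'] (p.map (fun c => [c]))).flatMap pvG = pvFm p := by
  induction p with
  | nil => rfl
  | cons c r ih =>
    cases r with
    | nil => simp [PySem.Chars.join, List.intercalate, pvFm]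
    | cons y ys =>
      simp only [List.map_cons] at *
      rw [PySem.Chars.join_cons_cons]
      have hdot : pvG '.' = ['.'] := by simp [pvG]
      simp only [List.flatMap_append, List.flatMap_cons, List.flatMap_nil, hdot] at *
      rw [ih]
      simp [pvFm]

theorem pvRest_false (cs : List Char) :
    pvRest false cs = (if (pvSplit cs).1 = [] then [] else ['.']) ++ pvRest true cs := by
  cases cs with
  | nil => rfl
  | cons c cs =>
    by_cases h : c = '+'
    · simp [pvRest, pvSplit, h]
    · simp [pvRest, pvSplit, h]

theorem pvRest_true (cs : List Char) :
    pvRest true cs = pvFm (pvSplit cs).1 ++ (pvSplit cs).2.flatMap (fun p => '+' :: pvFm p) := by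
  induction cs with
  | nil => rfl
  | cons c cs ih =>
    by_cases h : c = '+'
    · simp [pvRest, pvSplit, h, ih, pvFm]
    · simp only [pvRest, pvSplit, if_neg h]
      rw [pvRest_false, ih]
      rcases hs : pvSplit cs with ⟨h1, t1⟩
      by_cases hcnd : PySem.Chars.upperChar c = c ∧ c ≠ '.'
      · cases h1 <;> simp [pvFm, pvG, hcnd]
      · cases h1 <;> simp [pvFm, pvG, hcnd]

theorem pvGo_spec : ∀ (fuel : Nat) (l cur : List Char) (acc : List (List Char)),
    l.length < fuel →
    PySem.Chars.splitOn.go ['+'] fuel l cur acc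
      = acc.reverse ++ (cur.reverse ++ (pvSplit l).1) :: (pvSplit l).2 := by
  intro fuel
  induction fuel with
  | zero => intro l cur acc h; omega
  | succ n ih =>
    intro l cur acc h
    cases l with
    | nil => rw [PySem.Chars.splitOn.go.eq_def]; simp [pvSplit]
    | cons c rest =>
      rw [PySem.Chars.splitOn.go.eq_def]
      by_cases hc : c = '+'
      · simp only [hc, List.isPrefixOf, BEq.rfl, Bool.true_and, if_pos]
        rw [ih _ _ _ (by simpa using Nat.lt_of_succ_lt_succ h)]
        simp [pvSplit]
      · have hpre : List.isPrefixOf ['+'] (c :: rest) = false := by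
          simp [List.isPrefixOf]
          exact fun hh => hc hh.symm
        simp only [hpre, Bool.false_eq_true, if_false]
        rw [ih _ _ _ (by simpa using Nat.lt_of_succ_lt_succ h)]
        simp [pvSplit, hc]

theorem pvSplitOn_eq (l : List Char) :
    PySem.Chars.splitOn l ['+'] = ((pvSplit l).1) :: (pvSplit l).2 := by
  unfold PySem.Chars.splitOn
  rw [pvGo_spec _ _ _ _ (by omega)]
  simp

theorem pvBfold (cs : List Char) : ∀ (acc : List Char) (st : Bool),
    (cs.foldl (fun (st : List Char × Bool) c =>
      if c = '+' then (st.1 ++ ['+'], true)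
      else (st.1 ++ (if st.2 then [] else ['.'])
                 ++ (if PySem.Chars.upperChar c = c ∧ c ≠ '.' then ['!'] else [])
                 ++ [c], false)) (acc, st)).1 = acc ++ pvRest st cs := by
  induction cs with
  | nil => intro acc st; simp [pvRest]
  | cons c cs ih =>
    intro acc st
    simp only [List.foldl_cons]
    by_cases h : c = '+'
    · rw [if_pos h, ih]
      simp [pvRest, h]
    · rw [if_neg h, ih]
      simp [pvRest, h]

theorem pvJoinPlus : ∀ (t : List (List Char)) (x : List Char),
    PySem.Chars.join ['+'] (x :: t) = x ++ t.flatMap (fun p => '+' :: p) := by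
  intro t
  induction t with
  | nil => intro x; simp [PySem.Chars.join_singleton]
  | cons y ys ih =>
    intro x
    rw [PySem.Chars.join_cons_cons, ih]
    simp

theorem pvMono (m : List Char) :
    PySem.Chars.join []
      (ourInnerLoop ((PySem.Chars.join ['.'] (m.map (fun c => [c]))).map (fun c => [c])))
      = pvFm m := by
  rw [pvInnerLoop_eq, pvJoinNil, ← List.flatMap_def, pvDotted]

-- ===== VERDICT (by name: the statement is the Claim_ definition above) =====
theorem our_to_user_spec : Claim_equal_our_to_user := by
  unfold Claim_equal_our_to_user
  intro f _
  unfold Spec_our_to_user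
  have hA : our_to_user f
      = String.ofList (pvFm (pvSplit f.toList).1
          ++ (pvSplit f.toList).2.flatMap (fun p => '+' :: pvFm p)) := by
    unfold our_to_user
    dsimp only
    rw [pvSplitOn_eq, PySem.List.foldl_append_singleton_eq_map
      (fun (m : List Char) => PySem.Chars.join []
        (ourInnerLoop (List.map (fun c => [c]) (PySem.Chars.join ['.'] (List.map (fun c => [c]) m)))))]
    simp only [List.nil_append, List.map_cons]
    rw [pvMono, pvJoinPlus]
    congr 1
    rw [List.flatMap_map]
    congr 1
    apply List.flatMap_congr
    intro p _
    rw [pvMono]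
  have hB : our_to_user_alt f = String.ofList (pvRest true f.toList) := by
    unfold our_to_user_alt
    dsimp only
    rw [pvBfold]
    simp
  rw [hA, hB, pvRest_true]
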